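-- pv_equiv track=rewrite | github.com/hanahh080601/Digital-Signal-Processing | STE_fixed.py | get_index_voice
-- ===== SOURCE A (Python) =====
-- def get_index_voice(vad):
--     big_arr = []                    # mảng output
--     small_arr = []                  # chứa index của đoạn tín hiệu speech
--     count = 0                       # đếm số tín hiệu trong 1 small_array
--     for i in range(len(vad)):
--         if(vad[i] == 1):
--             small_arr.append(i)
--             count += 1
--         else:
--             if(count == 0):
--                 continue
--             else:
--                 # big_arr chỉ llaaysindex bắt đầu - kết thúc của small_arr
--                 big_arr.append([small_arr[0], small_arr[-1]])
--                 small_arr = []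
--                 count = 0
--     return big_arr
-- ===== SOURCE B (Python) =====
-- def get_index_voice(vad):
--     # Staged edge-detection: compare vad with its shifted-by-one copy.
--     shifted = [0] + vad[:-1]
--     starts = [i for i, (p, v) in enumerate(zip(shifted, vad)) if v == 1 and p != 1]
--     ends = [i - 1 for i, (p, v) in enumerate(zip(shifted, vad)) if v != 1 and p == 1]
--     # zip truncates: an unterminated trailing run has a start but no end, so it is dropped (as in A)
--     return [[s, e] for s, e in zip(starts, ends)]
-- ===== Notes on version B (the rewrite author's own statement) =====
-- stated objective: alternative
-- what changed: B replaces A's stateful single pass (per-run index list + counter) by staged whole-list passes: zip vad with its shifted copy, collect rising-edge indices and falling-edge indices as two separate lists, and zip them into segments (zip truncation drops an unterminated trailing run, as A does).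
import Mathlib
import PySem

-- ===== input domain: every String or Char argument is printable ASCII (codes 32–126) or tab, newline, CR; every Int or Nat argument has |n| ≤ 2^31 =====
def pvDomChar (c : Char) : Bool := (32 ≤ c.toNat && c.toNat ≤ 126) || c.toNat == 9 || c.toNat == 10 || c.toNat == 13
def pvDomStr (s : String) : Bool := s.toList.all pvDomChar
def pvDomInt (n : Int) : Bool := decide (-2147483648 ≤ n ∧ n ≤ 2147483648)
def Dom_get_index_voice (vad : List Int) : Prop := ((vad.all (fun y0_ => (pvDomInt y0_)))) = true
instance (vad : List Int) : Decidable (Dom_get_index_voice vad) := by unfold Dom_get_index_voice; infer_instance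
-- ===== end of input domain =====

-- B replaces A's stateful run-collecting pass by staged passes: zip vad with its shifted copy, list rising and falling edges, zip them (truncation drops a trailing run, like A).


-- ===== PORT A =====
-- A's loop 'for i in range(len(vad))' reading vad[i], with state (big_arr, small_arr, count);
-- small_arr[0] / small_arr[-1] are ported as headI / getLastI: the access is guarded by count ≠ 0,
-- under which small_arr is nonempty, so these are exact.
def goA (big : List (List Int)) (small : List Int) (count : Int) (i : Int) :
    List Int → List (List Int)
  | [] => big
  | v :: rest =>
    if v == 1 then
      goA big (small ++ [i]) (count + 1) (i + 1) rest
    else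
      if count == 0 then
        goA big small count (i + 1) rest
      else
        goA (big ++ [[small.headI, small.getLastI]]) [] 0 (i + 1) rest

def get_index_voice (vad : List Int) : List (List Int) :=
  goA [] [] 0 0 vad

-- ===== PORT B =====
-- B's staged passes; pvShifted is Python's 'shifted = [0] + vad[:-1]' (vad[:-1] = slice _ none (some (-1))),
-- pvStarts / pvEnds are the two comprehensions over enumerate(zip(shifted, vad)).
def pvShifted (vad : List Int) : List Int := 0 :: PySem.List.slice vad none (some (-1))

def pvStarts (vad : List Int) : List Int :=
  ((PySem.List.enumerate ((pvShifted vad).zip vad) 0).filter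
    (fun q => q.2.2 == 1 && q.2.1 != 1)).map (fun q => q.1)

def pvEnds (vad : List Int) : List Int :=
  ((PySem.List.enumerate ((pvShifted vad).zip vad) 0).filter
    (fun q => q.2.2 != 1 && q.2.1 == 1)).map (fun q => q.1 - 1)

def get_index_voice_alt (vad : List Int) : List (List Int) :=
  ((pvStarts vad).zip (pvEnds vad)).map (fun p => [p.1, p.2])

-- ===== PRECONDITION & SPEC =====
def Spec_get_index_voice (vad : List Int) (out : List (List Int)) : Prop := out = get_index_voice_alt vad
instance (vad : List Int) (out : List (List Int)) : Decidable (Spec_get_index_voice vad out) := by unfold Spec_get_index_voice; infer_instance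

-- ===== CLAIM (what is proved, stated in full; the proofs are below) =====
def Claim_equal_get_index_voice : Prop := ∀ (vad : List Int), Dom_get_index_voice vad → Spec_get_index_voice vad (get_index_voice vad)

-- ===== LEMMAS AND PROOFS =====

-- 'previous element' pairing: zip of (prev :: l.dropLast) with l, structurally.
def pairsOf (prev : Int) : List Int → List (Int × Int)
  | [] => []
  | v :: r => (prev, v) :: pairsOf v r

theorem zip_shifted_eq_pairsOf : ∀ (l : List Int) (prev : Int),
    (prev :: l.dropLast).zip l = pairsOf prev l := by
  intro l
  induction l with
  | nil => intro prev; rfl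
  | cons v r ih =>
    intro prev
    cases r with
    | nil => rfl
    | cons r0 r' =>
      simp only [List.dropLast_cons₂, List.zip_cons_cons, pairsOf]
      exact congrArg _ (ih v)

-- rising-edge indices of l, previous element prev, current absolute index j
def S (j prev : Int) : List Int → List Int
  | [] => []
  | v :: r => if v = 1 ∧ prev ≠ 1 then j :: S (j + 1) v r else S (j + 1) v r

-- falling-edge end indices (index before the fall)
def E (j prev : Int) : List Int → List Int
  | [] => []
  | v :: r => if v ≠ 1 ∧ prev = 1 then (j - 1) :: E (j + 1) v r else E (j + 1) v r

theorem starts_eq_S : ∀ (l : List Int) (j prev : Int),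
    ((PySem.List.enumerate (pairsOf prev l) j).filter
      (fun q => q.2.2 == 1 && q.2.1 != 1)).map (fun q => q.1) = S j prev l := by
  intro l
  induction l with
  | nil => intro j prev; rfl
  | cons v r ih =>
    intro j prev
    simp only [pairsOf, PySem.List.enumerate_cons, List.filter_cons, S]
    by_cases h : v = 1 ∧ prev ≠ 1
    · rw [if_pos h]
      have hc : ((j, prev, v).2.2 == 1 && (j, prev, v).2.1 != 1) = true := by
        simp [h.1, h.2]
      rw [hc]
      simpa [h.1] using congrArg (List.cons j) (ih (j + 1) 1)
    · rw [if_neg h]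
      have hc : ((j, prev, v).2.2 == 1 && (j, prev, v).2.1 != 1) = false := by
        rcases Decidable.not_and_iff_not_or_not.mp h with h1 | h2
        · simp [h1]
        · simp [not_not.mp h2]
      rw [hc]
      exact ih (j + 1) v

theorem ends_eq_E : ∀ (l : List Int) (j prev : Int),
    ((PySem.List.enumerate (pairsOf prev l) j).filter
      (fun q => q.2.2 != 1 && q.2.1 == 1)).map (fun q => q.1 - 1) = E j prev l := by
  intro l
  induction l with
  | nil => intro j prev; rfl
  | cons v r ih =>
    intro j prev
    simp only [pairsOf, PySem.List.enumerate_cons, List.filter_cons, E]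
    by_cases h : v ≠ 1 ∧ prev = 1
    · rw [if_pos h]
      have hc : ((j, prev, v).2.2 != 1 && (j, prev, v).2.1 == 1) = true := by
        simp [h.1, h.2]
      rw [hc]
      simpa using congrArg (List.cons (j - 1)) (ih (j + 1) v)
    · rw [if_neg h]
      have hc : ((j, prev, v).2.2 != 1 && (j, prev, v).2.1 == 1) = false := by
        rcases Decidable.not_and_iff_not_or_not.mp h with h1 | h2
        · simp [not_not.mp h1]
        · simp [h2]
      rw [hc]
      exact ih (j + 1) v

-- coupling invariant between A's state and the edge lists of the remaining suffix
theorem goA_eq_zip : ∀ (l : List Int) (j : Int) (big : List (List Int))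
    (small : List Int) (prev : Int),
    (prev = 1 → small ≠ [] ∧ small.getLastI = j - 1) →
    (prev ≠ 1 → small = []) →
    goA big small (small.length : Int) j l =
      big ++ (((if prev = 1 then [small.headI] else []) ++ S j prev l).zip
        (E j prev l)).map (fun p => [p.1, p.2]) := by
  intro l
  induction l with
  | nil =>
    intro j big small prev _ _
    simp [goA, S, E]
  | cons v r ih =>
    intro j big small prev h1 h0
    by_cases hv : v = 1
    · subst hv
      simp only [goA, beq_self_eq_true, if_true]
      by_cases hp : prev = 1
      · subst hp
        obtain ⟨hne, _⟩ := h1 rfl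
        have hstep := ih (j + 1) big (small ++ [j]) 1
          (fun _ => ⟨by simp, by simp [List.getLastI_eq_getLast?_getD]⟩)
          (fun h => absurd rfl h)
        simp only [List.length_append, List.length_cons, List.length_nil] at hstep
        push_cast at hstep ⊢
        rw [hstep]
        have hh : (small ++ [j]).headI = small.headI := by
          rcases small with _ | ⟨a, s⟩
          · exact absurd rfl hne
          · rfl
        rw [hh]
        simp [S, E]
      · have hsm := h0 hp
        subst hsm
        have hstep := ih (j + 1) big [j] 1
          (fun _ => ⟨by simp, by simp [List.getLastI_eq_getLast?_getD]⟩)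
          (fun h => absurd rfl h)
        simp only [List.length_cons, List.length_nil] at hstep
        push_cast at hstep ⊢
        simp only [List.nil_append, List.length_nil, Nat.cast_zero, zero_add]
        rw [hstep]
        simp [S, E, hp]
    · by_cases hp : prev = 1
      · subst hp
        obtain ⟨hne, hlast⟩ := h1 rfl
        have hlen : ((small.length : Int) == 0) = false := by
          simp only [beq_eq_false_iff_ne, ne_eq, Int.natCast_eq_zero]
          simpa [List.length_eq_zero_iff] using hne
        simp only [goA, beq_iff_eq, if_neg hv, hlen, Bool.false_eq_true, if_false]
        have hstep := ih (j + 1) (big ++ [[small.headI, j - 1]]) [] v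
          (fun h => absurd h hv) (fun _ => rfl)
        simp only [List.length_nil, Nat.cast_zero] at hstep
        rw [hlast, hstep]
        simp [S, E, hv, List.append_assoc]
      · have hsm := h0 hp
        subst hsm
        simp only [goA, beq_iff_eq, if_neg hv, List.length_nil, Nat.cast_zero,
          beq_self_eq_true, if_true]
        have hstep := ih (j + 1) big [] v (fun h => absurd h hv) (fun _ => rfl)
        simp only [List.length_nil, Nat.cast_zero] at hstep
        rw [hstep]
        simp [S, E, hv, hp]

-- ===== VERDICT (by name: the statement is the Claim_ definition above) =====
theorem get_index_voice_spec : Claim_equal_get_index_voice := by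
  intro vad _
  unfold Spec_get_index_voice get_index_voice get_index_voice_alt pvStarts pvEnds pvShifted
  rw [PySem.List.slice_to_neg_one, zip_shifted_eq_pairsOf vad 0]
  rw [starts_eq_S, ends_eq_E]
  have h := goA_eq_zip vad 0 [] [] 0 (fun h => absurd h (by norm_num)) (fun _ => rfl)
  simpa using h
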